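-- pv_equiv track=rewrite | github.com/DFdz26/BruteForcePlatforms | python_code/noveltySearch.py | __sort_values_by_parameter__
-- ===== SOURCE A (Python) =====
-- def __sort_values_by_parameter__(values, parameter):
--     aux_dic = {}
--     res_dic = {}
--
--     for i in range(len(values)):
--         if not (values[i][parameter] in aux_dic):
--             aux_dic[values[i][parameter]] = []
--
--         aux_dic[values[i][parameter]].append(i)
--
--     key_sorted = sorted(aux_dic)
--
--     for k in key_sorted:
--         res_dic[k] = aux_dic[k]
--
--     return res_dic
-- ===== SOURCE B (Python) =====
-- def __sort_values_by_parameter__(values, parameter):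
--     # Stable-sort the indices by their parameter value, then emit consecutive
--     # equal-key runs; stability keeps each group's indices in original order.
--     order = sorted(range(len(values)), key=lambda i: values[i][parameter])
--     res = {}
--     j = 0
--     while j < len(order):
--         k = values[order[j]][parameter]
--         group = [order[j]]
--         j += 1
--         while j < len(order) and values[order[j]][parameter] == k:
--             group.append(order[j])
--             j += 1
--         res[k] = group
--     return res
-- ===== Notes on version B (the rewrite author's own statement) =====
-- stated objective: alternative
-- what changed: Instead of bucketing indices into a dict and then rebuilding it in sorted-key order, B stably sorts the index list by its parameter value once and emits consecutive equal-key runs as the groups.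
import Mathlib
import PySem

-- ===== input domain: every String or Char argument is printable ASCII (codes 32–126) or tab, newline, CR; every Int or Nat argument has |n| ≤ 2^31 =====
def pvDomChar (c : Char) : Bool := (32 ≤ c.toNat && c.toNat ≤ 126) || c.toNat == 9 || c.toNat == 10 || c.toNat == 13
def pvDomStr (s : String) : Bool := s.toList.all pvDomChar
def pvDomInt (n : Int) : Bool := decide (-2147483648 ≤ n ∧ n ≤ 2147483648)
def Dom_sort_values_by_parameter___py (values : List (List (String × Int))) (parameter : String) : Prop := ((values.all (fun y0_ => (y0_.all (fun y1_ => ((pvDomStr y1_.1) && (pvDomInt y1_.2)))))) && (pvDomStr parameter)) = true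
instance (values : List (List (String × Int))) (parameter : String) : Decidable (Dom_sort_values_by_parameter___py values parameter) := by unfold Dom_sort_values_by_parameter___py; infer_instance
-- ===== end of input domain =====

-- B groups by a single stable sort of the indices instead of A's dict bucketing
-- followed by a sorted-key rebuild; same value everywhere (objective: alternative).

-- values[i][parameter] : dict lookup on row values[i]; under Pre_ the key is
-- always present, so the `.getD 0` default is never what is returned.
def pvKey (values : List (List (String × Int))) (parameter : String) (i : Int) : Int :=
  ((PySem.Dict.mk (PySem.List.pyGetD values i [])).get? parameter).getD 0

-- ===== PORT A =====
def sort_values_by_parameter___py (values : List (List (String × Int))) (parameter : String) : List (Int × List Int) :=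
  -- for i in range(len(values)): aux_dic.setdefault-style grouping = Dict.modify
  let aux : PySem.Dict Int (List Int) :=
    (PySem.List.pyRange 0 (values.length : Int) 1).foldl
      (fun d i => d.modify (pvKey values parameter i) [] (fun g => g ++ [i]))
      PySem.Dict.empty
  -- key_sorted = sorted(aux_dic)
  let key_sorted := PySem.List.sorted aux.keys (fun c => c) false
  -- for k in key_sorted: res_dic[k] = aux_dic[k]
  (key_sorted.foldl (fun r c => r.insert c (aux.getD c [])) PySem.Dict.empty).items

-- ===== PORT B =====
-- the outer/inner while loops of Source B: emit one consecutive equal-key run, recurse on the rest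
def pvGroupRuns (k : Int → Int) : List Int → List (Int × List Int)
  | [] => []
  | x :: xs =>
    (k x, x :: xs.takeWhile (fun y => k y == k x)) ::
      pvGroupRuns k (xs.dropWhile (fun y => k y == k x))
  termination_by l => l.length
  decreasing_by
    simpa using Nat.lt_succ_of_le (List.dropWhile_sublist _).length_le

def sort_values_by_parameter___py_alt (values : List (List (String × Int))) (parameter : String) : List (Int × List Int) :=
  pvGroupRuns (pvKey values parameter)
    (PySem.List.sorted (PySem.List.pyRange 0 (values.length : Int) 1) (pvKey values parameter) false)

-- ===== PRECONDITION & SPEC =====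
-- Pre_ excludes exactly the inputs where some row lacks `parameter`, on which the Python A raises KeyError.
def Pre_sort_values_by_parameter___py (values : List (List (String × Int))) (parameter : String) : Prop :=
  (values.all (fun row => row.any (fun p => p.1 == parameter))) = true
instance (values : List (List (String × Int))) (parameter : String) : Decidable (Pre_sort_values_by_parameter___py values parameter) := by unfold Pre_sort_values_by_parameter___py; infer_instance

def pvWitness_sort_values_by_parameter___py : (List (List (String × Int))) × String :=
  ([[("a", 2)], [("a", 1)], [("a", 2)]], "a")

def Spec_sort_values_by_parameter___py (values : List (List (String × Int))) (parameter : String) (out : List (Int × List Int)) : Prop := out = sort_values_by_parameter___py_alt values parameter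
instance (values : List (List (String × Int))) (parameter : String) (out : List (Int × List Int)) : Decidable (Spec_sort_values_by_parameter___py values parameter out) := by unfold Spec_sort_values_by_parameter___py; infer_instance

-- ===== CLAIM (what is proved, stated in full; the proofs are below) =====
def Claim_equal_sort_values_by_parameter___py : Prop := ∀ (values : List (List (String × Int))) (parameter : String), Dom_sort_values_by_parameter___py values parameter → Pre_sort_values_by_parameter___py values parameter → Spec_sort_values_by_parameter___py values parameter (sort_values_by_parameter___py values parameter)

-- ===== LEMMAS AND PROOFS =====

-- The key function and the index list are abstract (k, l) throughout the lemmas.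

-- A's grouping loop, read off one key: the indices with that key, in order.
theorem pv_getD_group (k : Int → Int) (l : List Int) (c : Int) :
    (l.foldl (fun d i => d.modify (k i) [] (fun g => g ++ [i]))
        (PySem.Dict.empty : PySem.Dict Int (List Int))).getD c []
      = l.filter (fun i => k i == c) := by
  have h1 : l.foldl (fun d i => d.modify (k i) [] (fun g => g ++ [i]))
        (PySem.Dict.empty : PySem.Dict Int (List Int))
      = (l.map (fun i => (k i, i))).foldl
          (fun d p => d.modify p.1 [] (fun g => g ++ [p.2])) PySem.Dict.empty := by
    rw [List.foldl_map]
  rw [h1, PySem.Dict.getD_foldl_modify_append]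
  simp [List.filter_map, Function.comp_def]

theorem pv_keys_group (k : Int → Int) (l : List Int) :
    (l.foldl (fun d i => d.modify (k i) [] (fun g => g ++ [i]))
        (PySem.Dict.empty : PySem.Dict Int (List Int))).keys
      = PySem.Set.ofList (l.map k) := by
  rw [PySem.Dict.keys_foldl_modify_key l k [] (fun _ i => fun g => g ++ [i])]
  simp [PySem.Dict.keys_empty, PySem.Set.update, PySem.Set.ofList, PySem.Set.empty]

-- Set.ofList keeps a sublist of its argument.
theorem pv_foldl_add_append {α : Type} [BEq α] (xs : List α) (acc : List α) :
    ∃ e, xs.foldl PySem.Set.add acc = acc ++ e ∧ e.Sublist xs := by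
  induction xs generalizing acc with
  | nil => exact ⟨[], by simp⟩
  | cons x xs ih =>
    by_cases h : List.contains acc x = true
    · obtain ⟨e, he, hs⟩ := ih acc
      refine ⟨e, ?_, hs.cons x⟩
      rw [List.foldl_cons, show PySem.Set.add acc x = acc from by simp [PySem.Set.add, PySem.Set.contains, h]]
      exact he
    · obtain ⟨e, he, hs⟩ := ih (acc ++ [x])
      refine ⟨x :: e, ?_, hs.cons₂ x⟩
      rw [List.foldl_cons, show PySem.Set.add acc x = acc ++ [x] from by simp [PySem.Set.add, PySem.Set.contains, h]]
      simpa using he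

theorem pv_ofList_sublist {α : Type} [BEq α] (xs : List α) :
    (PySem.Set.ofList xs).Sublist xs := by
  obtain ⟨e, he, hs⟩ := pv_foldl_add_append xs []
  simpa [PySem.Set.ofList, PySem.Set.empty, he] using hs

-- dedup of a ≤-sorted list is <-sorted
theorem pv_ofList_pairwise_lt (L : List Int) (h : L.Pairwise (· ≤ ·)) :
    (PySem.Set.ofList L).Pairwise (· < ·) := by
  have h1 : (PySem.Set.ofList L).Pairwise (· ≤ ·) :=
    List.Pairwise.sublist (pv_ofList_sublist L) h
  have h2 : (PySem.Set.ofList L).Pairwise (· ≠ ·) := PySem.Set.nodup_ofList L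
  exact (h1.and h2).imp (fun hab => lt_of_le_of_ne hab.1 hab.2)

-- insertBy with the sort's comparison preserves ≤-sortedness by key
theorem pv_insertBy_pairwise (k : Int → Int) (x : Int) (ys : List Int)
    (h : ys.Pairwise (fun a b => k a ≤ k b)) :
    (PySem.List.insertBy (fun a b => decide (k a < k b)) x ys).Pairwise
      (fun a b => k a ≤ k b) := by
  induction ys with
  | nil => simp [PySem.List.insertBy]
  | cons y ys ih =>
    rw [List.pairwise_cons] at h
    by_cases hlt : k x < k y
    · simp only [PySem.List.insertBy, hlt, decide_true, if_true]
      refine List.Pairwise.cons ?_ (List.Pairwise.cons h.1 h.2)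
      intro z hz
      rcases List.mem_cons.mp hz with rfl | hz
      · exact le_of_lt hlt
      · exact le_trans (le_of_lt hlt) (h.1 z hz)
    · simp only [PySem.List.insertBy, hlt, decide_false, Bool.false_eq_true, if_false]
      refine List.Pairwise.cons ?_ (ih h.2)
      intro z hz
      rcases (PySem.List.mem_insertBy _ _ _ _).mp hz with rfl | hz
      · exact le_of_not_gt hlt
      · exact h.1 z hz

-- stability, one insertion: the inserted element lands after its equals
theorem pv_filter_insertBy (k : Int → Int) (c x : Int) (ys : List Int)
    (h : ys.Pairwise (fun a b => k a ≤ k b)) :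
    (PySem.List.insertBy (fun a b => decide (k a < k b)) x ys).filter
        (fun z => k z == c)
      = ys.filter (fun z => k z == c) ++ (if k x == c then [x] else []) := by
  induction ys with
  | nil => by_cases hxc : (k x == c) <;> simp [PySem.List.insertBy, List.filter_cons, hxc]
  | cons y ys ih =>
    rw [List.pairwise_cons] at h
    by_cases hlt : k x < k y
    · simp only [PySem.List.insertBy, hlt, decide_true, if_true]
      by_cases hxc : k x == c
      · have hxc' : k x = c := by simpa using hxc
        have hnone : ∀ z ∈ y :: ys, (k z == c) = false := by
          intro z hz
          have : k y ≤ k z := by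
            rcases List.mem_cons.mp hz with rfl | hz
            · exact le_refl _
            · exact h.1 z hz
          have : c < k z := lt_of_lt_of_le (hxc' ▸ hlt) this
          simpa using (ne_of_gt this)
        rw [List.filter_cons_of_pos (by simpa using hxc)]
        rw [List.filter_eq_nil_iff.mpr (by intro a ha; simp [hnone a ha])]
        simp [hxc]
      · simp only [Bool.not_eq_true] at hxc
        simp [List.filter_cons, hxc]
    · simp only [PySem.List.insertBy, hlt, decide_false, Bool.false_eq_true, if_false]
      rw [List.filter_cons, List.filter_cons, ih h.2]
      by_cases hyc : k y == c <;> simp [hyc]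

-- stability of the whole insertion sort: filtering one key commutes with sorting
theorem pv_filter_foldl_insertBy (k : Int → Int) (c : Int) (xs : List Int) :
    ∀ acc : List Int, acc.Pairwise (fun a b => k a ≤ k b) →
    (xs.foldl (fun a x => PySem.List.insertBy (fun a b => decide (k a < k b)) x a) acc).filter
        (fun z => k z == c)
      = acc.filter (fun z => k z == c) ++ xs.filter (fun z => k z == c) := by
  induction xs with
  | nil => intro acc _; simp
  | cons x xs ih =>
    intro acc hacc
    rw [List.foldl_cons, ih _ (pv_insertBy_pairwise k x acc hacc),
        pv_filter_insertBy k c x acc hacc, List.filter_cons]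
    by_cases hxc : k x == c <;> simp [hxc]

theorem pv_filter_sorted (k : Int → Int) (c : Int) (l : List Int) :
    (PySem.List.sorted l k false).filter (fun z => k z == c)
      = l.filter (fun z => k z == c) := by
  rw [PySem.List.sorted_eq_foldl_insertBy]
  simpa using pv_filter_foldl_insertBy k c l [] (by simp)

-- head of dropWhile fails the test
theorem pv_dropWhile_head_not {α : Type} (p : α → Bool) :
    ∀ (l : List α) (z : α) (r : List α), l.dropWhile p = z :: r → p z = false := by
  intro l
  induction l with
  | nil => intro z r h; simp [List.dropWhile] at h
  | cons a l ih =>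
    intro z r h
    by_cases ha : p a
    · rw [List.dropWhile_cons_of_pos ha] at h; exact ih z r h
    · rw [List.dropWhile_cons_of_neg (by simpa using ha)] at h
      cases h; simpa using ha

-- run decomposition facts for a ≤-sorted (by key) list x :: s'
theorem pv_drop_keys_gt (k : Int → Int) (x : Int) (s' : List Int)
    (h : (x :: s').Pairwise (fun a b => k a ≤ k b)) :
    ∀ y ∈ s'.dropWhile (fun y => k y == k x), k x < k y := by
  rw [List.pairwise_cons] at h
  set d := s'.dropWhile (fun y => k y == k x) with hd
  cases hdc : d with
  | nil => simp [hdc]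
  | cons z r =>
    have hz : (k z == k x) = false := pv_dropWhile_head_not _ s' z r (hd ▸ hdc)
    have hsubd : d.Sublist s' := hd ▸ List.dropWhile_sublist _
    have hzx : k x < k z := by
      have hle : k x ≤ k z := h.1 z (hsubd.subset (hdc ▸ List.mem_cons_self))
      have : k z ≠ k x := by simpa using hz
      exact lt_of_le_of_ne hle (Ne.symm this)
    intro y hy
    rcases List.mem_cons.mp hy with rfl | hy
    · exact hzx
    · have hpd : d.Pairwise (fun a b => k a ≤ k b) := List.Pairwise.sublist hsubd h.2
      rw [hdc, List.pairwise_cons] at hpd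
      exact lt_of_lt_of_le hzx (hpd.1 y hy)

-- dedup of the key list of a sorted list peels off the first run's key
theorem pv_ofList_keys_cons (k : Int → Int) (x : Int) (s' : List Int)
    (h : (x :: s').Pairwise (fun a b => k a ≤ k b)) :
    PySem.Set.ofList ((x :: s').map k)
      = k x :: PySem.Set.ofList ((s'.dropWhile (fun y => k y == k x)).map k) := by
  have ht : ∀ y ∈ s'.takeWhile (fun y => k y == k x), k y = k x := by
    intro y hy; have h' := List.mem_takeWhile_imp hy; exact eq_of_beq h'
  have hsplit : s' = s'.takeWhile (fun y => k y == k x) ++ s'.dropWhile (fun y => k y == k x) :=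
    (List.takeWhile_append_dropWhile).symm
  set t := s'.takeWhile (fun y => k y == k x)
  set d := s'.dropWhile (fun y => k y == k x)
  have habsorb : ∀ (L : List Int), (∀ y ∈ L, y = k x) →
      ∀ acc : List Int, k x ∈ acc → L.foldl PySem.Set.add acc = acc := by
    intro L
    induction L with
    | nil => intro _ acc _; simp
    | cons a L ih =>
      intro hall acc hmem
      have ha : a = k x := hall a List.mem_cons_self
      have : PySem.Set.add acc a = acc := by
        simp [PySem.Set.add, PySem.Set.contains, ha, hmem]
      rw [List.foldl_cons, this]
      exact ih (fun y hy => hall y (List.mem_cons_of_mem a hy)) acc hmem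
  have h1 : PySem.Set.ofList ((x :: s').map k)
      = (d.map k).foldl PySem.Set.add [k x] := by
    conv_lhs => rw [hsplit]
    show ((x :: (t ++ d)).map k).foldl PySem.Set.add [] = _
    rw [List.map_cons, List.map_append, List.foldl_cons, List.foldl_append]
    have : PySem.Set.add ([] : List Int) (k x) = [k x] := by
      simp [PySem.Set.add, PySem.Set.contains, PySem.Set.empty]
    rw [show PySem.Set.add ([] : PySem.Set Int) (k x) = [k x] from this]
    rw [habsorb (t.map k) (by intro y hy; obtain ⟨w, hw, rfl⟩ := List.mem_map.mp hy; exact ht w hw)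
        [k x] (by simp)]
  rw [h1]
  have h2 : (d.map k).foldl PySem.Set.add [k x]
      = [k x] ++ (PySem.Set.ofList (d.map k)).filter (fun y => !(PySem.Set.contains [k x] y)) :=
    PySem.Set.update_eq_append_filter [k x] (d.map k)
  rw [h2]
  have h3 : (PySem.Set.ofList (d.map k)).filter (fun y => !(PySem.Set.contains [k x] y))
      = PySem.Set.ofList (d.map k) := by
    apply List.filter_eq_self.mpr
    intro a ha
    have ha' : a ∈ d.map k := (PySem.Set.mem_ofList _ _).mp ha
    obtain ⟨w, hw, rfl⟩ := List.mem_map.mp ha'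
    have : k x < k w := pv_drop_keys_gt k x s' h w hw
    simp [PySem.Set.contains, (ne_of_gt this)]
  rw [h3]; rfl

-- the groupby run characterisation
theorem pv_groupRuns_eq (k : Int → Int) (s : List Int)
    (h : s.Pairwise (fun a b => k a ≤ k b)) :
    pvGroupRuns k s
      = (PySem.Set.ofList (s.map k)).map (fun c => (c, s.filter (fun z => k z == c))) := by
  match s with
    | [] => simp [pvGroupRuns, PySem.Set.ofList, PySem.Set.empty]
    | x :: s' =>
      set t := s'.takeWhile (fun y => k y == k x) with htdef
      set d := s'.dropWhile (fun y => k y == k x) with hddef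
      have hsplit : s' = t ++ d := (List.takeWhile_append_dropWhile).symm
      have ht : ∀ y ∈ t, k y = k x := by
        intro y hy; have h' := List.mem_takeWhile_imp (htdef ▸ hy); exact eq_of_beq h'
      have hdgt : ∀ y ∈ d, k x < k y := pv_drop_keys_gt k x s' h
      have hpd : d.Pairwise (fun a b => k a ≤ k b) :=
        List.Pairwise.sublist (hddef ▸ List.dropWhile_sublist _) (List.pairwise_cons.mp h).2
      have hlen : d.length < (x :: s').length :=
        Nat.lt_succ_of_le (hddef ▸ List.dropWhile_sublist _).length_le
      have hrec : pvGroupRuns k (x :: s') = (k x, x :: t) :: pvGroupRuns k d := by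
        rw [pvGroupRuns]
      rw [hrec, pv_groupRuns_eq k d hpd, pv_ofList_keys_cons k x s' h, List.map_cons]
      congr 1
      · -- head group: filter of the whole list at key k x is x :: t
        congr 1
        have h2 : d.filter (fun z => k z == k x) = [] :=
          List.filter_eq_nil_iff.mpr (fun y hy => by simpa using ne_of_gt (hdgt y hy))
        have h1 : t.filter (fun z => k z == k x) = t :=
          List.filter_eq_self.mpr (fun y hy => by simp [ht y hy])
        rw [hsplit, List.filter_cons_of_pos (by simp), List.filter_append, h1, h2,
          List.append_nil]
      · -- later groups: x and t contribute nothing at keys > k x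
        apply List.map_congr_left
        intro c hc
        obtain ⟨w, hw, rfl⟩ := List.mem_map.mp ((PySem.Set.mem_ofList _ _).mp hc)
        have hcx : k x < k w := hdgt w hw
        have h1 : t.filter (fun z => k z == k w) = [] :=
          List.filter_eq_nil_iff.mpr (fun y hy => by simp [ht y hy]; exact ne_of_lt hcx)
        congr 1
        rw [hsplit, List.filter_cons_of_neg (by simpa using ne_of_lt hcx), List.filter_append,
          h1, List.nil_append]
termination_by s.length
decreasing_by simpa using hlen

-- the bridge between A's sorted key set and B's sorted index list
theorem pv_keys_eq (k : Int → Int) (l : List Int) :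
    PySem.List.sorted (PySem.Set.ofList (l.map k)) (fun c => c) false
      = PySem.Set.ofList ((PySem.List.sorted l k false).map k) := by
  apply PySem.List.sorted_eq_of_perm_of_pairwise_lt
  · apply (List.perm_ext_iff_of_nodup (PySem.Set.nodup_ofList _) (PySem.Set.nodup_ofList _)).mpr
    intro a
    rw [PySem.Set.mem_ofList, PySem.Set.mem_ofList]
    exact ((PySem.List.sorted_perm l k false).map k).mem_iff
  · exact pv_ofList_pairwise_lt _ (by
      simpa [List.pairwise_map] using PySem.List.sorted_pairwise l k)

-- the main generic equivalence
theorem pv_main (k : Int → Int) (l : List Int) :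
    ((PySem.List.sorted
        ((l.foldl (fun d i => d.modify (k i) [] (fun g => g ++ [i]))
            (PySem.Dict.empty : PySem.Dict Int (List Int))).keys) (fun c => c) false).foldl
      (fun r c => r.insert c
        ((l.foldl (fun d i => d.modify (k i) [] (fun g => g ++ [i]))
            (PySem.Dict.empty : PySem.Dict Int (List Int))).getD c []))
      PySem.Dict.empty).items
    = pvGroupRuns k (PySem.List.sorted l k false) := by
  set aux := l.foldl (fun d i => d.modify (k i) [] (fun g => g ++ [i]))
      (PySem.Dict.empty : PySem.Dict Int (List Int)) with haux
  set K := PySem.List.sorted aux.keys (fun c => c) false with hK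
  have hKnodup : K.Nodup := by
    rw [hK, haux, pv_keys_group]
    exact (PySem.List.sorted_perm _ _ _).symm.nodup (PySem.Set.nodup_ofList _)
  have hitems : (K.foldl (fun r c => r.insert c (aux.getD c [])) PySem.Dict.empty).items
      = K.map (fun c => (c, aux.getD c [])) := by
    have := PySem.Dict.items_foldl_insert_fresh K (fun c => c) (fun c => aux.getD c [])
      PySem.Dict.empty (by intro a _; exact PySem.Dict.contains_empty a)
      (by simpa using hKnodup)
    simpa using this
  rw [hitems]
  have hKval : K = PySem.Set.ofList ((PySem.List.sorted l k false).map k) := by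
    rw [hK, haux, pv_keys_group, pv_keys_eq]
  rw [hKval, pv_groupRuns_eq k _ (PySem.List.sorted_pairwise l k)]
  apply List.map_congr_left
  intro c _
  rw [haux, pv_getD_group, pv_filter_sorted]

-- ===== VERDICT (by name: the statement is the Claim_ definition above) =====
theorem sort_values_by_parameter___py_spec : Claim_equal_sort_values_by_parameter___py := by
  intro values parameter _ _
  unfold Spec_sort_values_by_parameter___py sort_values_by_parameter___py sort_values_by_parameter___py_alt
  exact pv_main (pvKey values parameter) (PySem.List.pyRange 0 (values.length : Int) 1)
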